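-- pv_equiv track=rewrite | github.com/mateuszsury/MicroPythonZigbee | python/uzigbee/node.py | _channels_from_mask
-- ===== SOURCE A (Python) =====
-- def _channels_from_mask(channel_mask):
--     channel_mask = int(channel_mask)
--     if channel_mask <= 0:
--         return ()
--     channels = []
--     for channel in range(11, 27):
--         if channel_mask & (1 << channel):
--             channels.append(int(channel))
--     return tuple(channels)
-- ===== SOURCE B (Python) =====
-- def _channels_from_mask(channel_mask):
--     # B: recursive bit-shift scan instead of testing each position with 1 << channel.
--     channel_mask = int(channel_mask)
--     if channel_mask <= 0:
--         return ()
--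
--     def go(m, pos):
--         if m == 0 or pos > 26:
--             return ()
--         rest = go(m >> 1, pos + 1)
--         return ((pos,) + rest) if (m & 1) else rest
--
--     return go(channel_mask >> 11, 11)
-- ===== Notes on version B (the rewrite author's own statement) =====
-- stated objective: alternative
-- what changed: Replaces the fixed range(11,27) scan that tests each position with channel_mask & (1 << channel) by a recursive scan that shifts the mask right, reads the low bit, and stops as soon as the remaining bits are exhausted.
import Mathlib
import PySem

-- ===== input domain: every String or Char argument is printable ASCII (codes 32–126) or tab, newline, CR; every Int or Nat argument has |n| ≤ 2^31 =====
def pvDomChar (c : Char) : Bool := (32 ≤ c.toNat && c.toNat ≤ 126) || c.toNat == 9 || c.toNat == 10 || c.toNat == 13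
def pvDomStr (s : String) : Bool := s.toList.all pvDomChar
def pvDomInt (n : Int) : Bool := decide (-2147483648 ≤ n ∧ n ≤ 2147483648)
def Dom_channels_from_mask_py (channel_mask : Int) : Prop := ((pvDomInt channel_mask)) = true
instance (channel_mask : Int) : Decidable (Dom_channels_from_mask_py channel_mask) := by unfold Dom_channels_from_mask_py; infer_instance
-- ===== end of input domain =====

-- B replaces the fixed range(11,27) scan testing 1 << channel by a recursive
-- right-shift scan of the mask that stops when no bits remain (objective: alternative).

-- ===== PORT A =====
-- 'channel' ranges over 11..26 (nonnegative), so '.toNat' on the shift amount is exact.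
def channels_from_mask_py (channel_mask : Int) : List Int :=
  if channel_mask ≤ 0 then []
  else
    (PySem.List.pyRange 11 27 1).foldl
      (fun acc channel =>
        if PySem.Int.band channel_mask ((1 : Int) <<< channel.toNat) ≠ 0 then acc ++ [channel] else acc)
      []

-- ===== PORT B =====
-- go(m, pos) from Source B; 'm >> 1' is Lean's 'm >>> 1' (Python-exact), 'm & 1' is PySem.Int.band m 1.
def channels_from_mask_go (m pos : Int) : List Int :=
  if m = 0 ∨ 26 < pos then []
  else
    let rest := channels_from_mask_go (m >>> 1) (pos + 1)
    if PySem.Int.band m 1 ≠ 0 then pos :: rest else rest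
termination_by (27 - pos).toNat
decreasing_by simp only [not_or, not_lt] at *; omega

def channels_from_mask_py_alt (channel_mask : Int) : List Int :=
  if channel_mask ≤ 0 then []
  else channels_from_mask_go (channel_mask >>> 11) 11

-- ===== PRECONDITION & SPEC =====
def Spec_channels_from_mask_py (channel_mask : Int) (out : List Int) : Prop := out = channels_from_mask_py_alt channel_mask
instance (channel_mask : Int) (out : List Int) : Decidable (Spec_channels_from_mask_py channel_mask out) := by unfold Spec_channels_from_mask_py; infer_instance

-- ===== CLAIM (what is proved, stated in full; the proofs are below) =====
def Claim_equal_channels_from_mask_py : Prop := ∀ (channel_mask : Int), Dom_channels_from_mask_py channel_mask → Spec_channels_from_mask_py channel_mask (channels_from_mask_py channel_mask)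

-- ===== LEMMAS AND PROOFS =====

theorem pv_natCast_shiftRight (n p : Nat) : ((n : Int) >>> p) = ((n >>> p : Nat) : Int) := by
  simp [Int.shiftRight_eq_div_pow, Nat.shiftRight_eq_div_pow]

theorem pv_band_two_pow (n c : Nat) :
    (PySem.Int.band (n : Int) ((1 : Int) <<< c) ≠ 0) ↔ n.testBit c = true := by
  have h : ((1 : Int) <<< c) = ((1 <<< c : Nat) : Int) := by
    simp [Int.shiftLeft_eq, Nat.shiftLeft_eq]
  rw [h, PySem.Int.band_natCast]
  simp [Nat.shiftLeft_eq, Nat.and_two_pow]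

theorem pv_band_one (n : Nat) :
    (PySem.Int.band ((n : Nat) : Int) 1 ≠ 0) ↔ n.testBit 0 = true := by
  have h : (PySem.Int.band (n : Int) 1) = ((n &&& 1 : Nat) : Int) := by
    have := PySem.Int.band_natCast n 1
    simpa using this
  rw [h]
  simp [Nat.and_one_is_mod, Nat.testBit_zero]
  omega

theorem pv_band_zero_of_lt (n : Nat) (c : Int) (hlt : n < 2 ^ c.toNat) :
    PySem.Int.band (n : Int) ((1 : Int) <<< (c.toNat : Int)) = 0 := by
  rw [Int.shiftLeft_natCast_right]
  by_contra hne
  have := (pv_band_two_pow n c.toNat).mp hne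
  rw [Nat.testBit_lt_two_pow hlt] at this
  exact Bool.false_ne_true this

theorem pv_go_eq (n : Nat) :
    ∀ (k : Nat) (pos : Int), pos = 27 - (k : Int) → k ≤ 16 →
    channels_from_mask_go ((n >>> pos.toNat : Nat) : Int) pos
      = (PySem.List.pyRange pos 27 1).filter
          (fun c => decide (PySem.Int.band (n : Int) ((1 : Int) <<< c.toNat) ≠ 0)) := by
  intro k
  induction k with
  | zero =>
    intro pos hpos _
    have h27 : pos = 27 := by omega
    subst h27
    rw [channels_from_mask_go, PySem.List.pyRange_one]
    norm_num
  | succ k ih =>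
    intro pos hpos hk
    have hlt : pos < 27 := by omega
    have h11 : 11 ≤ pos := by omega
    rw [PySem.List.pyRange_one_cons hlt, channels_from_mask_go]
    by_cases hz : n >>> pos.toNat = 0
    · -- the remaining mask is empty: every bit at a position ≥ pos is unset
      have hcond : ((n >>> pos.toNat : Nat) : Int) = 0 ∨ 26 < pos := by
        left; exact_mod_cast congrArg (Nat.cast : Nat → Int) hz
      rw [if_pos hcond]
      have hpow : 0 < 2 ^ pos.toNat := Nat.two_pow_pos pos.toNat
      have hsmall : n < 2 ^ pos.toNat := by
        rw [Nat.shiftRight_eq_div_pow] at hz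
        exact (Nat.div_eq_zero_iff_lt hpow).mp hz
      symm
      rw [List.filter_eq_nil_iff]
      intro c hc
      have hcpos : pos ≤ c := by
        rcases List.mem_cons.mp hc with rfl | hc'
        · exact le_refl _
        · have := (PySem.List.mem_pyRange_one.mp hc').1; omega
      have hlt2 : n < 2 ^ c.toNat :=
        lt_of_lt_of_le hsmall (Nat.pow_le_pow_right (by norm_num) (by omega))
      have hb0 := pv_band_zero_of_lt n c hlt2
      simp only [ne_eq, decide_eq_true_eq, not_not]
      exact hb0
    · have hcond : ¬ (((n >>> pos.toNat : Nat) : Int) = 0 ∨ 26 < pos) := by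
        refine not_or.mpr ⟨?_, by omega⟩
        exact_mod_cast hz
      rw [if_neg hcond]
      have hshift : ((n >>> pos.toNat : Nat) : Int) >>> (1 : Int)
          = ((n >>> (pos + 1).toNat : Nat) : Int) := by
        have h1 : ((n >>> pos.toNat : Nat) : Int) >>> (1 : Int)
            = ((n >>> pos.toNat : Nat) : Int) >>> (1 : Nat) := by
          have := Int.shiftRight_natCast_right ((n >>> pos.toNat : Nat) : Int) 1
          simpa using this
        rw [h1, pv_natCast_shiftRight]
        congr 1
        rw [← Nat.shiftRight_add]
        congr 1
        omega
      have hrest := ih (pos + 1) (by omega) (by omega)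
      have hbit01 : (n >>> pos.toNat).testBit 0 = n.testBit pos.toNat := by
        simp
      by_cases hb : n.testBit pos.toNat = true
      · have htest : PySem.Int.band ((n >>> pos.toNat : Nat) : Int) 1 ≠ 0 := by
          rw [pv_band_one, hbit01]; exact hb
        have hhead : decide (PySem.Int.band (n : Int) ((1 : Int) <<< ((pos.toNat : Nat) : Int)) ≠ 0) = true := by
          rw [Int.shiftLeft_natCast_right]
          simp [pv_band_two_pow, hb]
        rw [List.filter_cons, if_pos hhead, if_pos htest, hshift, hrest]
      · have hbf : n.testBit pos.toNat = false := by simpa using hb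
        have htest : ¬ (PySem.Int.band ((n >>> pos.toNat : Nat) : Int) 1 ≠ 0) := by
          rw [pv_band_one, hbit01, hbf]; simp
        have hhead : decide (PySem.Int.band (n : Int) ((1 : Int) <<< ((pos.toNat : Nat) : Int)) ≠ 0) = false := by
          rw [Int.shiftLeft_natCast_right]
          simp [pv_band_two_pow, hbf]
        have h2 : ¬ (decide (PySem.Int.band (n : Int) ((1 : Int) <<< ((pos.toNat : Nat) : Int)) ≠ 0) = true) := by
          rw [hhead]; simp
        rw [List.filter_cons, if_neg htest, hshift, hrest, if_neg h2]

-- ===== VERDICT (by name: the statement is the Claim_ definition above) =====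
theorem channels_from_mask_py_spec : Claim_equal_channels_from_mask_py := by
  intro mask _
  unfold Spec_channels_from_mask_py channels_from_mask_py channels_from_mask_py_alt
  by_cases h : mask ≤ 0
  · simp [h]
  · rw [if_neg h, if_neg h]
    have hnn : 0 ≤ mask := by omega
    obtain ⟨n, rfl⟩ : ∃ n : Nat, mask = (n : Int) := ⟨mask.toNat, (Int.toNat_of_nonneg hnn).symm⟩
    rw [PySem.List.foldl_append_ite_eq_filter]
    have hsh : ((n : Int) >>> (11 : Int)) = ((n >>> (11 : Int).toNat : Nat) : Int) := by
      rw [show ((11 : Int)) = (((11 : Nat) : Nat) : Int) by norm_num,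
        Int.shiftRight_natCast_right, pv_natCast_shiftRight]
      rfl
    rw [hsh, pv_go_eq n 16 11 (by norm_num) (by norm_num), List.nil_append]
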